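-- pv_equiv track=rewrite | github.com/berczig/PositivityConjectures | test.py | evaluate_Conditions2
-- ===== SOURCE A (Python) =====
-- IGNORE_EDGE = 0
--
-- seqlength = 15
--
-- def evaluate_Conditions2(lk_correct_seqs, Condition_matrix):
--     # step 1: encode right condition into condition-MATRIX and check against all correct seqs
--     counter = 0
--
--     def checkrowcondition(lkcorseq, rowcondition):
--         for i in range(seqlength):
--             if rowcondition[i] != IGNORE_EDGE:
--                 if rowcondition[i] != lkcorseq[i]:
--                     return False
--         return True
--
--     for lkcorseq in lk_correct_seqs:
--         if all([checkrowcondition(lkcorseq, rowcondition) for rowcondition in Condition_matrix]):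
--             counter += 1
--
--     return counter
-- ===== SOURCE B (Python) =====
-- IGNORE_EDGE = 0
--
-- seqlength = 15
--
-- def evaluate_Conditions2(lk_correct_seqs, Condition_matrix):
--     # prebuild, per row-condition, the (position, required value) pairs within the row
--     constraints = [[(i, row[i]) for i in range(min(seqlength, len(row))) if row[i] != IGNORE_EDGE]
--                    for row in Condition_matrix]
--     return sum(1 for seq in lk_correct_seqs
--                if all(seq[i] == v for cons in constraints for (i, v) in cons))
-- ===== Notes on version B (the rewrite author's own statement) =====
-- stated objective: alternative
-- what changed: B precomputes for each condition row the list of (index, value) constraints once, then counts sequences satisfying all constraints via a flat generator with sum, instead of re-scanning all 15 positions of every row for every sequence through a helper with early returns.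
import Mathlib
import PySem

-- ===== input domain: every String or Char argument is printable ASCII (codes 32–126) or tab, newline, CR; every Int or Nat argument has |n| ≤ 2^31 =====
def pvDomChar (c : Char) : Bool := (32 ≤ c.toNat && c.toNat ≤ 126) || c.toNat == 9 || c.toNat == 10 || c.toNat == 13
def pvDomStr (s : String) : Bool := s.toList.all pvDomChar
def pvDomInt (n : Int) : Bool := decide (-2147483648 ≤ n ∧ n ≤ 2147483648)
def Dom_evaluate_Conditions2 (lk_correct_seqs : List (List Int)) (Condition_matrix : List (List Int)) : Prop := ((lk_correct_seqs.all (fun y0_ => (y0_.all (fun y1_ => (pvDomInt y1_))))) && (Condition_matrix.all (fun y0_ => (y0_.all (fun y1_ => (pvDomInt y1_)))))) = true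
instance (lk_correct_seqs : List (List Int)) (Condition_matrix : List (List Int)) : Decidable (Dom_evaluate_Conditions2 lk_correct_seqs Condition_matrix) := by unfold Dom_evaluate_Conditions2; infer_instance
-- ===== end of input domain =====

-- B replaces the per-sequence 15-position scan of every condition row by a
-- (index, value) constraint list precomputed once per row (objective: alternative decomposition).

-- ===== PORT A =====
-- helper 'checkrowcondition': early return at first violated constraint = short-circuit 'all'
def pvCheckRowCondition (lkcorseq rowcondition : List Int) : Bool :=
  (List.range 15).all (fun (i : Nat) =>
    let r := PySem.List.pyGetD rowcondition (i : Int) 0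
    if r ≠ 0 then r == PySem.List.pyGetD lkcorseq (i : Int) 0 else true)

def evaluate_Conditions2 (lk_correct_seqs : List (List Int)) (Condition_matrix : List (List Int)) : Int :=
  lk_correct_seqs.foldl (fun counter lkcorseq =>
    if (Condition_matrix.map (fun rowcondition => pvCheckRowCondition lkcorseq rowcondition)).all id
    then counter + 1 else counter) 0

-- ===== PORT B =====
def evaluate_Conditions2_alt (lk_correct_seqs : List (List Int)) (Condition_matrix : List (List Int)) : Int :=
  let constraints := Condition_matrix.map (fun row =>
    (List.range (min 15 row.length)).filterMap (fun (i : Nat) =>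
      let r := PySem.List.pyGetD row (i : Int) 0
      if r ≠ 0 then some ((i : Int), r) else none))
  ((lk_correct_seqs.filter (fun seq =>
      constraints.all (fun cons =>
        cons.all (fun iv => PySem.List.pyGetD seq iv.1 0 == iv.2)))).length : Int)

-- ===== PRECONDITION & SPEC =====
-- Pre_ holds exactly when every (sequence, row) scan of A terminates (a mismatch is hit,
-- or all 15 positions are read in range); it excludes exactly the inputs on which the
-- Python A raises IndexError.
def Pre_evaluate_Conditions2 (lk_correct_seqs : List (List Int)) (Condition_matrix : List (List Int)) : Prop :=
  ∀ seq ∈ lk_correct_seqs, ∀ row ∈ Condition_matrix, ∀ i ∈ List.range 15,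
    (∀ j ∈ List.range i,
       ¬ (row.getD j 0 ≠ 0 ∧ row.getD j 0 ≠ seq.getD j 0 ∧ j < seq.length ∧ j < row.length))
    → (i < row.length ∧ (row.getD i 0 ≠ 0 → i < seq.length))
instance (lk_correct_seqs : List (List Int)) (Condition_matrix : List (List Int)) : Decidable (Pre_evaluate_Conditions2 lk_correct_seqs Condition_matrix) := by unfold Pre_evaluate_Conditions2; infer_instance
def pvWitness_evaluate_Conditions2 : List (List Int) × List (List Int) :=
  ([[1, 2, 0, 0, 0, 0, 0, 0, 0, 0, 0, 0, 0, 0, 0]],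
   [[1, 0, 0, 0, 0, 0, 0, 0, 0, 0, 0, 0, 0, 0, 0]])
def Spec_evaluate_Conditions2 (lk_correct_seqs : List (List Int)) (Condition_matrix : List (List Int)) (out : Int) : Prop := out = evaluate_Conditions2_alt lk_correct_seqs Condition_matrix
instance (lk_correct_seqs : List (List Int)) (Condition_matrix : List (List Int)) (out : Int) : Decidable (Spec_evaluate_Conditions2 lk_correct_seqs Condition_matrix out) := by unfold Spec_evaluate_Conditions2; infer_instance

-- ===== CLAIM (what is proved, stated in full; the proofs are below) =====
def Claim_equal_evaluate_Conditions2 : Prop := ∀ (lk_correct_seqs : List (List Int)) (Condition_matrix : List (List Int)), Dom_evaluate_Conditions2 lk_correct_seqs Condition_matrix → Pre_evaluate_Conditions2 lk_correct_seqs Condition_matrix → Spec_evaluate_Conditions2 lk_correct_seqs Condition_matrix (evaluate_Conditions2 lk_correct_seqs Condition_matrix)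

-- ===== LEMMAS AND PROOFS =====

-- counting fold = length of filter
theorem pv_foldl_count {α : Type} (p : α → Bool) :
    ∀ (l : List α) (c : Int),
      l.foldl (fun counter x => if p x then counter + 1 else counter) c
        = c + ((l.filter p).length : Int) := by
  intro l
  induction l with
  | nil => intro c; simp
  | cons x xs ih =>
    intro c
    by_cases h : p x = true
    · simp [List.foldl, List.filter, h, ih]; ring
    · simp [List.foldl, List.filter, h, ih]

-- (a == b) = (b == a) on Int
theorem pv_beq_swap (a b : Int) : (a == b) = (b == a) := by
  by_cases h : a = b
  · simp [h]
  · simp [beq_false_of_ne h, beq_false_of_ne (Ne.symm h)]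

-- A's row check equals B's constraint-list check (generalised over the index list)
theorem pv_row_eq_aux (seq row : List Int) :
    ∀ (l : List Nat),
      (l.all (fun (i : Nat) =>
          if PySem.List.pyGetD row (i : Int) 0 ≠ 0 then
            PySem.List.pyGetD row (i : Int) 0 == PySem.List.pyGetD seq (i : Int) 0
          else true))
        = ((l.filterMap (fun (i : Nat) =>
            if PySem.List.pyGetD row (i : Int) 0 ≠ 0 then
              some ((i : Int), PySem.List.pyGetD row (i : Int) 0)
            else none)).all
            (fun iv => PySem.List.pyGetD seq iv.1 0 == iv.2)) := by
  intro l
  induction l with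
  | nil => rfl
  | cons x xs ih =>
    rcases eq_or_ne (PySem.List.pyGetD row (x : Int) 0) 0 with h | h
    · rw [List.all_cons, if_neg (not_not_intro h),
          List.filterMap_cons_none (by rw [if_neg (not_not_intro h)]),
          Bool.true_and, ih]
    · rw [List.all_cons, if_pos h,
          List.filterMap_cons_some (by rw [if_pos h]),
          List.all_cons, ih, pv_beq_swap]

theorem pv_filterMap_range_min (row : List Int) :
    ((List.range (min 15 row.length)).filterMap (fun (i : Nat) =>
        if PySem.List.pyGetD row (i : Int) 0 ≠ 0 then
          some ((i : Int), PySem.List.pyGetD row (i : Int) 0) else none))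
      = ((List.range 15).filterMap (fun (i : Nat) =>
        if PySem.List.pyGetD row (i : Int) 0 ≠ 0 then
          some ((i : Int), PySem.List.pyGetD row (i : Int) 0) else none)) := by
  rcases Nat.lt_or_ge row.length 15 with h | h
  · rw [Nat.min_eq_right h.le]
    conv_rhs => rw [show (15 : Nat) = row.length + (15 - row.length) by omega,
                    List.range_add, List.filterMap_append]
    have hnone : ∀ k : Nat,
        (if PySem.List.pyGetD row ((row.length + k : Nat) : Int) 0 ≠ 0 then
          some (((row.length + k : Nat) : Int), PySem.List.pyGetD row ((row.length + k : Nat) : Int) 0)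
         else none) = none := by
      intro k
      have h0 : PySem.List.pyGetD row ((row.length : Int) + (k : Int)) 0 = 0 := by
        rw [show (row.length : Int) + (k : Int) = ((row.length + k : Nat) : Int) by push_cast; ring,
            PySem.List.pyGetD_natCast]
        simp [List.getElem?_eq_none (show row.length ≤ row.length + k by omega)]
      simp [h0]
    simp [List.filterMap_map, Function.comp, hnone]
  · rw [Nat.min_eq_left h]

theorem pv_row_eq (seq row : List Int) :
    pvCheckRowCondition seq row
      = ((List.range 15).filterMap (fun (i : Nat) =>
          let r := PySem.List.pyGetD row (i : Int) 0
          if r ≠ 0 then some ((i : Int), r) else none)).all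
          (fun iv => PySem.List.pyGetD seq iv.1 0 == iv.2) := by
  simpa only [pvCheckRowCondition] using pv_row_eq_aux seq row (List.range 15)

-- ===== VERDICT (by name: the statement is the Claim_ definition above) =====
theorem evaluate_Conditions2_spec : Claim_equal_evaluate_Conditions2 := by
  intro lk cm _ _
  unfold Spec_evaluate_Conditions2 evaluate_Conditions2 evaluate_Conditions2_alt
  simp only [pv_foldl_count, zero_add]
  congr 2
  apply List.filter_congr
  intro seq _
  simp only [List.all_map]
  exact List.all_congr rfl (fun row => by
    simp only [Function.comp, id_eq, pv_filterMap_range_min, pv_row_eq])
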